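-- pv_equiv track=rewrite | github.com/fdgrock/gaming-ai-bot | streamlit_app/Backup/ai_lottery_bot/mathematical_engine_backup.py | _generate_coverage_optimized_sets
-- ===== SOURCE A (Python) =====
-- from typing import Dict, List, Tuple, Any, Optional
--
-- def _generate_coverage_optimized_sets(historical_data: List[List[int]],
--                                     num_sets: int, numbers_per_set: int, max_number: int) -> List[List[int]]:
--     """Generate sets optimized for number coverage"""
--     sets = []
--     used_numbers = set()
--
--     # Simple greedy coverage algorithm
--     for i in range(num_sets):
--         selected = []
--
--         # Select numbers that maximize coverage
--         for num in range(1, max_number + 1):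
--             if num not in used_numbers and len(selected) < numbers_per_set:
--                 selected.append(num)
--                 used_numbers.add(num)
--
--         # If not enough new numbers, reuse some
--         if len(selected) < numbers_per_set:
--             for num in range(1, max_number + 1):
--                 if len(selected) >= numbers_per_set:
--                     break
--                 if num not in selected:
--                     selected.append(num)
--
--         sets.append(sorted(selected[:numbers_per_set]))
--
--     return sets
-- ===== SOURCE B (Python) =====
-- def _generate_coverage_optimized_sets(historical_data, num_sets, numbers_per_set, max_number):
--     """Closed-form per set: set i is the next block of unused numbers, padded from 1 upward once exhausted."""
--     k = numbers_per_set
--     cap = max(max_number, 0)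
--     sets = []
--     for i in range(num_sets):
--         if k <= 0:
--             sets.append([])
--             continue
--         u = min(i * k, cap)                 # numbers 1..u are already used
--         hi = min(u + k, max_number)         # fresh block u+1..hi
--         tail = list(range(u + 1, hi + 1))
--         t = min(k - len(tail), u)           # pad with 1..t when fresh numbers ran out
--         sets.append(list(range(1, t + 1)) + tail)
--     return sets
-- ===== Notes on version B (the rewrite author's own statement) =====
-- stated objective: faster
-- what changed: Replaces A's two full scans of 1..max_number per set (with a growing used-numbers set) by a closed-form computation of each set as a contiguous fresh block u+1..hi plus a pad 1..t, emitted directly; intended as faster (measured 56.4x at the largest size both finished), unconfirmed at sizes where both are bound by the sheer output size.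
import Mathlib
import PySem

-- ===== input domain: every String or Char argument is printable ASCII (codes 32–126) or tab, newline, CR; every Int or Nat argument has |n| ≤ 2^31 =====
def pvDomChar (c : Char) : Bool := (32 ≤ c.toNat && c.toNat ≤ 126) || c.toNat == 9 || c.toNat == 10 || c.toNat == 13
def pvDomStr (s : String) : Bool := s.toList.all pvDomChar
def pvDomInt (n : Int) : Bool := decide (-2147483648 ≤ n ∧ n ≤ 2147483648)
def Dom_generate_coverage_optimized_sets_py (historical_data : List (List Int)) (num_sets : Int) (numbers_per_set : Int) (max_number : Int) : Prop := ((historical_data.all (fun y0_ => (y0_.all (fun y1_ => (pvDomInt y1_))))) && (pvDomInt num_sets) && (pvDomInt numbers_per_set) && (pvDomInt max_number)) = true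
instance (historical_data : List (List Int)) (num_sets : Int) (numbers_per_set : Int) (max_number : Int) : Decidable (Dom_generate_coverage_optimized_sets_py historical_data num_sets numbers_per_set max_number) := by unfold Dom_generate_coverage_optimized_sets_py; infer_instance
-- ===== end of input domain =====

-- B replaces A's per-set scans of 1..max_number by a closed-form block computation per set
-- (intended as faster; a timing run measured 56.4x at the largest size both finished,
-- unconfirmed at sizes where both programs are bound by the output size).

-- ===== PORT A =====
-- inner loop 1 of A: collect unused numbers while len(selected) < numbers_per_set
def pvSelBody (K : Int) (q : List Int × PySem.Set Int) (num : Int) : List Int × PySem.Set Int :=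
  if PySem.Set.contains q.2 num = false ∧ (q.1.length : Int) < K then
    (q.1 ++ [num], PySem.Set.add q.2 num)
  else q

-- inner loop 2 of A (the 'reuse' fill; the 'break' is the monotone length test up front)
def pvFillBody (K : Int) (sel : List Int) (num : Int) : List Int :=
  if K ≤ (sel.length : Int) then sel
  else if num ∈ sel then sel
  else sel ++ [num]

-- one iteration of A's outer loop (state: sets built so far, used_numbers)
def pvIterA (K M : Int) (st : List (List Int) × PySem.Set Int) : List (List Int) × PySem.Set Int :=
  let p := (PySem.List.pyRange 1 (M + 1) 1).foldl (pvSelBody K) ([], st.2)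
  let selected :=
    if (p.1.length : Int) < K then (PySem.List.pyRange 1 (M + 1) 1).foldl (pvFillBody K) p.1
    else p.1
  (st.1 ++ [PySem.List.sorted (PySem.List.slice selected none (some K)) (fun x => x) false], p.2)

def generate_coverage_optimized_sets_py (historical_data : List (List Int)) (num_sets : Int) (numbers_per_set : Int) (max_number : Int) : List (List Int) :=
  ((PySem.List.pyRange 0 num_sets 1).foldl
      (fun st _i => pvIterA numbers_per_set max_number st)
      ([], PySem.Set.empty)).1

-- ===== PORT B =====
-- closed-form set i: fresh block u+1..hi, padded with 1..t once numbers run out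
def pvBlockB (K M : Int) (i : Int) : List Int :=
  if K ≤ 0 then []
  else
    let u := min (i * K) (max M 0)
    let hi := min (u + K) M
    let tail := PySem.List.pyRange (u + 1) (hi + 1) 1
    let t := min (K - (tail.length : Int)) u
    PySem.List.pyRange 1 (t + 1) 1 ++ tail

def generate_coverage_optimized_sets_py_alt (historical_data : List (List Int)) (num_sets : Int) (numbers_per_set : Int) (max_number : Int) : List (List Int) :=
  (PySem.List.pyRange 0 num_sets 1).foldl
    (fun sets i => sets ++ [pvBlockB numbers_per_set max_number i]) []

-- ===== PRECONDITION & SPEC =====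
def Spec_generate_coverage_optimized_sets_py (historical_data : List (List Int)) (num_sets : Int) (numbers_per_set : Int) (max_number : Int) (out : List (List Int)) : Prop := out = generate_coverage_optimized_sets_py_alt historical_data num_sets numbers_per_set max_number
instance (historical_data : List (List Int)) (num_sets : Int) (numbers_per_set : Int) (max_number : Int) (out : List (List Int)) : Decidable (Spec_generate_coverage_optimized_sets_py historical_data num_sets numbers_per_set max_number out) := by unfold Spec_generate_coverage_optimized_sets_py; infer_instance

-- ===== CLAIM (what is proved, stated in full; the proofs are below) =====
def Claim_equal_generate_coverage_optimized_sets_py : Prop := ∀ (historical_data : List (List Int)) (num_sets : Int) (numbers_per_set : Int) (max_number : Int), Dom_generate_coverage_optimized_sets_py historical_data num_sets numbers_per_set max_number → Spec_generate_coverage_optimized_sets_py historical_data num_sets numbers_per_set max_number (generate_coverage_optimized_sets_py historical_data num_sets numbers_per_set max_number)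

-- ===== LEMMAS AND PROOFS =====

-- selection loop: every number already used → state unchanged
lemma pv_sel_skip_mem (K : Int) (L : List Int) (sel : List Int) (used : PySem.Set Int)
    (h : ∀ x ∈ L, PySem.Set.contains used x = true) :
    L.foldl (pvSelBody K) (sel, used) = (sel, used) := by
  induction L with
  | nil => rfl
  | cons a L ih =>
      have ha := h a (by simp)
      simp only [List.foldl_cons, pvSelBody, ha]
      simp only [Bool.true_eq_false, false_and, if_false]
      exact ih (fun x hx => h x (by simp [hx]))

-- selection loop: already numbers_per_set numbers selected → state unchanged
lemma pv_sel_skip_len (K : Int) (L : List Int) (sel : List Int) (used : PySem.Set Int)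
    (h : ¬ ((sel.length : Int) < K)) :
    L.foldl (pvSelBody K) (sel, used) = (sel, used) := by
  induction L with
  | nil => rfl
  | cons a L ih =>
      simp only [List.foldl_cons, pvSelBody]
      rw [if_neg (by simp [h])]
      exact ih

-- selection loop: n fresh numbers fit → they are all appended to both accumulators
lemma pv_sel_take (K : Int) (n : Nat) : ∀ (a : Int) (sel : List Int) (used : PySem.Set Int),
    (∀ x, a ≤ x → x < a + n → PySem.Set.contains used x = false) →
    ((sel.length : Int) + n ≤ K) →
    (PySem.List.pyRange a (a + n) 1).foldl (pvSelBody K) (sel, used)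
      = (sel ++ PySem.List.pyRange a (a + n) 1, used ++ PySem.List.pyRange a (a + n) 1) := by
  induction n with
  | zero =>
      intro a sel used _ _
      rw [PySem.List.pyRange_one_eq_nil (by omega)]
      simp
  | succ n ih =>
      intro a sel used hfresh hlen
      rw [PySem.List.pyRange_one_cons (by push_cast; omega)]
      have ha : PySem.Set.contains used a = false := hfresh a le_rfl (by push_cast; omega)
      simp only [List.foldl_cons, pvSelBody, ha]
      rw [if_pos ⟨by simp, by push_cast at hlen ⊢; omega⟩]
      have hadd : PySem.Set.add used a = used ++ [a] := by
        simp [PySem.Set.add, PySem.Set.contains] at ha ⊢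
        simp [ha]
      rw [hadd]
      have hfresh' : ∀ x, a + 1 ≤ x → x < (a + 1) + (n : Int) →
          PySem.Set.contains (used ++ [a]) x = false := by
        intro x h1 h2
        have := hfresh x (by omega) (by push_cast; omega)
        simp [PySem.Set.contains] at this ⊢
        constructor
        · exact this
        · omega
      have := ih (a + 1) (sel ++ [a]) (used ++ [a]) hfresh'
        (by push_cast at hlen ⊢; simp; omega)
      have harr : a + (1 : Int) + (n : Int) = a + ((n : Nat) + 1 : Nat) := by push_cast; ring
      rw [harr] at this
      rw [this]
      simp

-- fill loop: already full → unchanged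
lemma pv_fill_skip_len (K : Int) (L : List Int) (sel : List Int)
    (h : K ≤ (sel.length : Int)) :
    L.foldl (pvFillBody K) sel = sel := by
  induction L with
  | nil => rfl
  | cons a L ih =>
      simp only [List.foldl_cons, pvFillBody, if_pos h]
      exact ih

-- fill loop: every number already selected → unchanged
lemma pv_fill_skip_mem (K : Int) (L : List Int) (sel : List Int)
    (h : ∀ x ∈ L, x ∈ sel) :
    L.foldl (pvFillBody K) sel = sel := by
  induction L with
  | nil => rfl
  | cons a L ih =>
      have ha := h a (by simp)
      simp only [List.foldl_cons, pvFillBody]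
      by_cases hK : K ≤ (sel.length : Int)
      · rw [if_pos hK]; exact ih (fun x hx => h x (by simp [hx]))
      · rw [if_neg hK, if_pos ha]; exact ih (fun x hx => h x (by simp [hx]))

-- fill loop: n fresh numbers fit → all appended
lemma pv_fill_take (K : Int) (n : Nat) : ∀ (a : Int) (sel : List Int),
    (∀ x, a ≤ x → x < a + n → x ∉ sel) →
    ((sel.length : Int) + n ≤ K) →
    (PySem.List.pyRange a (a + n) 1).foldl (pvFillBody K) sel
      = sel ++ PySem.List.pyRange a (a + n) 1 := by
  induction n with
  | zero =>
      intro a sel _ _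
      rw [PySem.List.pyRange_one_eq_nil (by omega)]
      simp
  | succ n ih =>
      intro a sel hfresh hlen
      rw [PySem.List.pyRange_one_cons (by push_cast; omega)]
      simp only [List.foldl_cons, pvFillBody]
      rw [if_neg (by push_cast at hlen ⊢; omega),
          if_neg (hfresh a le_rfl (by push_cast; omega))]
      have hfresh' : ∀ x, a + 1 ≤ x → x < (a + 1) + (n : Int) → x ∉ sel ++ [a] := by
        intro x h1 h2
        simp only [List.mem_append, List.mem_singleton]
        push_neg
        exact ⟨hfresh x (by omega) (by push_cast; omega), by omega⟩
      have := ih (a + 1) (sel ++ [a]) hfresh' (by push_cast at hlen ⊢; simp; omega)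
      have harr : a + (1 : Int) + (n : Int) = a + ((n : Nat) + 1 : Nat) := by push_cast; ring
      rw [harr] at this
      rw [this]
      simp

-- sorting tail ++ pad gives pad ++ tail when pad's numbers all precede tail's
lemma pv_sorted_two_runs (t u hi : Int) (htu : t ≤ u) :
    PySem.List.sorted (PySem.List.pyRange (u + 1) (hi + 1) 1 ++ PySem.List.pyRange 1 (t + 1) 1)
      (fun x => x) false
    = PySem.List.pyRange 1 (t + 1) 1 ++ PySem.List.pyRange (u + 1) (hi + 1) 1 := by
  apply PySem.List.sorted_id_eq_of_perm_of_pairwise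
  · exact List.perm_append_comm
  · rw [List.pairwise_append]
    refine ⟨(PySem.List.pairwise_lt_pyRange_one _ _).imp (fun h => le_of_lt h),
      (PySem.List.pairwise_lt_pyRange_one _ _).imp (fun h => le_of_lt h), ?_⟩
    intro x hx y hy
    rw [PySem.List.mem_pyRange_one] at hx hy
    omega

-- one outer iteration of A, for used_numbers = {1..u}: emit pad ++ fresh block, advance u
lemma pv_iter_core (K M u : Int) (hK : 0 < K) (hu0 : 0 ≤ u) (hucap : u ≤ max M 0)
    (sets : List (List Int)) :
    pvIterA K M (sets, PySem.List.pyRange 1 (u + 1) 1)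
    = (sets ++ [PySem.List.pyRange 1 (min (K - (min (u + K) M - u)) u + 1) 1
          ++ PySem.List.pyRange (u + 1) (min (u + K) M + 1) 1],
       PySem.List.pyRange 1 (min (u + K) (max M 0) + 1) 1) := by
  obtain ⟨hi, hhi⟩ : ∃ h, h = min (u + K) M := ⟨_, rfl⟩
  obtain ⟨t, hT⟩ : ∃ h, h = min (K - (hi - u)) u := ⟨_, rfl⟩
  rw [← hhi, ← hT]
  by_cases hM : M < 0
  · -- empty range 1..max_number: everything is nil
    have hu0' : u = 0 := by omega
    have hrange : PySem.List.pyRange 1 (M + 1) 1 = [] :=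
      PySem.List.pyRange_one_eq_nil (by omega)
    have hused : PySem.List.pyRange 1 (u + 1) 1 = [] :=
      PySem.List.pyRange_one_eq_nil (by omega)
    have hpad : PySem.List.pyRange 1 (t + 1) 1 = [] :=
      PySem.List.pyRange_one_eq_nil (by omega)
    have htail : PySem.List.pyRange (u + 1) (hi + 1) 1 = [] :=
      PySem.List.pyRange_one_eq_nil (by omega)
    have hused' : PySem.List.pyRange 1 (min (u + K) (max M 0) + 1) 1 = [] :=
      PySem.List.pyRange_one_eq_nil (by omega)
    unfold pvIterA
    rw [hused, hrange, hused', hpad, htail]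
    simp only [List.foldl_nil, List.length_nil, Nat.cast_zero]
    rw [if_pos hK]
    have hsl : PySem.List.slice ([] : List Int) none (some K) = [] := by
      simp [PySem.List.slice]
    rw [hsl]
    rfl
  · push_neg at hM
    have huhi : u ≤ hi := by omega
    have hhiM : hi ≤ M := by omega
    have hhiuK : hi ≤ u + K := by omega
    have ht0 : 0 ≤ t := by omega
    have htu : t ≤ u := by omega
    have htlen : ((PySem.List.pyRange (u + 1) (hi + 1) 1).length : Int) = hi - u := by
      rw [PySem.List.length_pyRange_one]; omega
    -- phase split of the selection loop
    have hsplit : PySem.List.pyRange 1 (M + 1) 1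
        = PySem.List.pyRange 1 (u + 1) 1 ++ PySem.List.pyRange (u + 1) (hi + 1) 1
          ++ PySem.List.pyRange (hi + 1) (M + 1) 1 := by
      rw [← PySem.List.pyRange_one_append 1 (u + 1) (hi + 1) (by omega) (by omega),
        ← PySem.List.pyRange_one_append 1 (hi + 1) (M + 1) (by omega) (by omega)]
    have hph1 : (PySem.List.pyRange 1 (u + 1) 1).foldl (pvSelBody K)
        ([], PySem.List.pyRange 1 (u + 1) 1) = ([], PySem.List.pyRange 1 (u + 1) 1) := by
      apply pv_sel_skip_mem
      intro x hx
      simpa [PySem.Set.contains] using hx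
    have hph2 : (PySem.List.pyRange (u + 1) (hi + 1) 1).foldl (pvSelBody K)
        ([], PySem.List.pyRange 1 (u + 1) 1)
        = (PySem.List.pyRange (u + 1) (hi + 1) 1,
           PySem.List.pyRange 1 (u + 1) 1 ++ PySem.List.pyRange (u + 1) (hi + 1) 1) := by
      have := pv_sel_take K (hi - u).toNat (u + 1) [] (PySem.List.pyRange 1 (u + 1) 1)
        (by
          intro x h1 h2
          simp [PySem.Set.contains, PySem.List.mem_pyRange_one]
          omega)
        (by simp; omega)
      have harg : (u : Int) + 1 + ((hi - u).toNat : Int) = hi + 1 := by omega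
      rw [harg] at this
      simpa using this
    have husedtail : PySem.List.pyRange 1 (u + 1) 1 ++ PySem.List.pyRange (u + 1) (hi + 1) 1
        = PySem.List.pyRange 1 (hi + 1) 1 :=
      (PySem.List.pyRange_one_append 1 (u + 1) (hi + 1) (by omega) (by omega)).symm
    have hph3 : (PySem.List.pyRange (hi + 1) (M + 1) 1).foldl (pvSelBody K)
        (PySem.List.pyRange (u + 1) (hi + 1) 1, PySem.List.pyRange 1 (hi + 1) 1)
        = (PySem.List.pyRange (u + 1) (hi + 1) 1, PySem.List.pyRange 1 (hi + 1) 1) := by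
      by_cases hfull : u + K ≤ M
      · exact pv_sel_skip_len K _ _ _ (by omega)
      · rw [PySem.List.pyRange_one_eq_nil (a := hi + 1) (b := M + 1) (by omega)]
        rfl
    have hsel : (PySem.List.pyRange 1 (M + 1) 1).foldl (pvSelBody K)
        ([], PySem.List.pyRange 1 (u + 1) 1)
        = (PySem.List.pyRange (u + 1) (hi + 1) 1, PySem.List.pyRange 1 (hi + 1) 1) := by
      rw [hsplit, List.foldl_append, List.foldl_append, hph1, hph2, husedtail, hph3]
    -- the fill phase
    have hselected :
        (if (((PySem.List.pyRange (u + 1) (hi + 1) 1).length : Int) < K) then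
            (PySem.List.pyRange 1 (M + 1) 1).foldl (pvFillBody K)
              (PySem.List.pyRange (u + 1) (hi + 1) 1)
          else PySem.List.pyRange (u + 1) (hi + 1) 1)
        = PySem.List.pyRange (u + 1) (hi + 1) 1 ++ PySem.List.pyRange 1 (t + 1) 1 := by
      by_cases hneed : (hi - u) < K
      · -- fill runs; here hi = M
        have hhiM' : hi = M := by omega
        rw [if_pos (by omega)]
        have hsplit2 : PySem.List.pyRange 1 (M + 1) 1
            = PySem.List.pyRange 1 (t + 1) 1 ++ PySem.List.pyRange (t + 1) (u + 1) 1
              ++ PySem.List.pyRange (u + 1) (M + 1) 1 := by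
          rw [← PySem.List.pyRange_one_append 1 (t + 1) (u + 1) (by omega) (by omega),
            ← PySem.List.pyRange_one_append 1 (u + 1) (M + 1) (by omega) (by omega)]
        rw [hsplit2, List.foldl_append, List.foldl_append]
        have hf1 : (PySem.List.pyRange 1 (t + 1) 1).foldl (pvFillBody K)
            (PySem.List.pyRange (u + 1) (hi + 1) 1)
            = PySem.List.pyRange (u + 1) (hi + 1) 1 ++ PySem.List.pyRange 1 (t + 1) 1 := by
          have := pv_fill_take K t.toNat 1 (PySem.List.pyRange (u + 1) (hi + 1) 1)
            (by
              intro x h1 h2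
              rw [PySem.List.mem_pyRange_one]
              omega)
            (by rw [PySem.List.length_pyRange_one]; omega)
          have harg : (1 : Int) + (t.toNat : Int) = t + 1 := by omega
          rw [harg] at this
          exact this
        rw [hf1]
        have hf2 : (PySem.List.pyRange (t + 1) (u + 1) 1).foldl (pvFillBody K)
            (PySem.List.pyRange (u + 1) (hi + 1) 1 ++ PySem.List.pyRange 1 (t + 1) 1)
            = PySem.List.pyRange (u + 1) (hi + 1) 1 ++ PySem.List.pyRange 1 (t + 1) 1 := by
          by_cases hcase : K - (hi - u) ≤ u
          · -- selected is full after the pad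
            apply pv_fill_skip_len
            simp only [List.length_append, PySem.List.length_pyRange_one]
            push_cast
            omega
          · -- t = u: nothing between t+1 and u+1
            rw [PySem.List.pyRange_one_eq_nil (a := t + 1) (b := u + 1) (by omega)]
            rfl
        rw [hf2]
        apply pv_fill_skip_mem
        intro x hx
        simp only [List.mem_append]
        left
        rw [hhiM']
        exact hx
      · -- the fresh block is already full: t = 0, no pad
        rw [if_neg (by omega)]
        have ht' : t = 0 := by omega
        rw [ht', PySem.List.pyRange_one_eq_nil (a := 1) (b := 0 + 1) (by omega)]
        simp
    -- assemble
    unfold pvIterA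
    simp only
    rw [hsel]
    simp only
    rw [htlen] at hselected ⊢
    rw [hselected]
    have hslice : PySem.List.slice
        (PySem.List.pyRange (u + 1) (hi + 1) 1 ++ PySem.List.pyRange 1 (t + 1) 1)
        none (some K)
        = PySem.List.pyRange (u + 1) (hi + 1) 1 ++ PySem.List.pyRange 1 (t + 1) 1 := by
      rw [PySem.List.slice_to _ (by omega : (0:Int) ≤ K)]
      apply List.take_of_length_le
      have : ((PySem.List.pyRange (u + 1) (hi + 1) 1 ++ PySem.List.pyRange 1 (t + 1) 1).length : Int) ≤ K := by
        simp only [List.length_append, PySem.List.length_pyRange_one]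
        push_cast
        omega
      omega
    rw [hslice, pv_sorted_two_runs t u hi htu]
    have hidx : hi = min (u + K) (max M 0) := by omega
    rw [hidx]

-- one outer iteration of A equals appending B's closed-form block, with used = {1..min(i·K, max(M,0))}
lemma pv_iterA_eq (K M i : Int) (hi0 : 0 ≤ i) (sets : List (List Int)) :
    pvIterA K M (sets, PySem.List.pyRange 1 (min (i * K) (max M 0) + 1) 1)
    = (sets ++ [pvBlockB K M i], PySem.List.pyRange 1 (min ((i + 1) * K) (max M 0) + 1) 1) := by
  have hiK : (i + 1) * K = i * K + K := by ring
  by_cases hK : K ≤ 0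
  · -- numbers_per_set ≤ 0: nothing is ever selected
    have hik : i * K ≤ 0 := mul_nonpos_of_nonneg_of_nonpos hi0 hK
    have hik1 : (i + 1) * K ≤ 0 := mul_nonpos_of_nonneg_of_nonpos (by omega) hK
    have h1 : PySem.List.pyRange 1 (min (i * K) (max M 0) + 1) 1 = [] :=
      PySem.List.pyRange_one_eq_nil (by omega)
    have h2 : PySem.List.pyRange 1 (min ((i + 1) * K) (max M 0) + 1) 1 = [] :=
      PySem.List.pyRange_one_eq_nil (by omega)
    rw [h1, h2]
    unfold pvIterA
    rw [pv_sel_skip_len K _ [] [] (by simp; omega)]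
    simp only [if_neg (show ¬ ((([] : List Int).length : Int) < K) by simp; omega)]
    unfold pvBlockB
    rw [if_pos hK]
    have hsl : PySem.List.slice ([] : List Int) none (some K) = [] := by
      simp [PySem.List.slice]
    rw [hsl]
    rfl
  · push_neg at hK
    have hik0 : 0 ≤ i * K := mul_nonneg hi0 (by omega)
    have := pv_iter_core K M (min (i * K) (max M 0)) hK (by omega) (by omega) sets
    rw [this]
    simp only [pvBlockB, PySem.List.length_pyRange_one]
    rw [if_neg (show ¬ K ≤ 0 by omega)]
    have h1 : min (K - (min (min (i * K) (max M 0) + K) M - min (i * K) (max M 0)))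
          (min (i * K) (max M 0))
        = min (K - ((min (min (i * K) (max M 0) + K) M + 1
              - (min (i * K) (max M 0) + 1)).toNat : Int)) (min (i * K) (max M 0)) := by
      omega
    have h2 : min (min (i * K) (max M 0) + K) (max M 0) = min ((i + 1) * K) (max M 0) := by
      omega
    rw [h1, h2]

-- the outer loops agree, index by index
lemma pv_outer (K M : Int) (n : Nat) : ∀ (i : Int) (sets : List (List Int)), 0 ≤ i →
    (PySem.List.pyRange i (i + n) 1).foldl (fun st _i => pvIterA K M st)
      (sets, PySem.List.pyRange 1 (min (i * K) (max M 0) + 1) 1)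
    = ((PySem.List.pyRange i (i + n) 1).foldl (fun s j => s ++ [pvBlockB K M j]) sets,
       PySem.List.pyRange 1 (min ((i + n) * K) (max M 0) + 1) 1) := by
  induction n with
  | zero =>
      intro i sets _
      rw [PySem.List.pyRange_one_eq_nil (a := i) (b := i + ((0 : Nat) : Int)) (by simp)]
      simp only [List.foldl_nil]
      have h1 : i + ((0 : Nat) : Int) = i := by push_cast; ring
      rw [h1]
  | succ n ih =>
      intro i sets hi0
      rw [PySem.List.pyRange_one_cons (a := i) (b := i + (((n : Nat) + 1 : Nat) : Int))
        (by push_cast; omega)]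
      simp only [List.foldl_cons]
      rw [pv_iterA_eq K M i hi0 sets]
      have harr : i + ((n : Nat) + 1 : Nat) = (i + 1) + (n : Int) := by push_cast; ring
      rw [harr]
      exact ih (i + 1) (sets ++ [pvBlockB K M i]) (by omega)

-- ===== VERDICT (by name: the statement is the Claim_ definition above) =====
theorem generate_coverage_optimized_sets_py_spec : Claim_equal_generate_coverage_optimized_sets_py := by
  intro historical_data num_sets K M _
  unfold Spec_generate_coverage_optimized_sets_py
  unfold generate_coverage_optimized_sets_py generate_coverage_optimized_sets_py_alt
  by_cases hn : num_sets ≤ 0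
  · rw [PySem.List.pyRange_one_eq_nil hn]
    rfl
  · push_neg at hn
    have hns : (num_sets.toNat : Int) = num_sets := by omega
    have h0 : (0 : Int) + (num_sets.toNat : Int) = num_sets := by omega
    have hinit : PySem.List.pyRange 1 (min ((0 : Int) * K) (max M 0) + 1) 1 = [] := by
      apply PySem.List.pyRange_one_eq_nil
      have : (0 : Int) * K = 0 := by ring
      omega
    have := pv_outer K M num_sets.toNat 0 [] le_rfl
    rw [h0, hinit] at this
    show ((PySem.List.pyRange 0 num_sets 1).foldl (fun st _i => pvIterA K M st)
        ([], ([] : PySem.Set Int))).1 = _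
    rw [this]
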